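-- pv_equiv track=rewrite | github.com/elianap/h-divexplorer | utils_hierarchy.py | incompatible_attribute_value
-- ===== SOURCE A (Python) =====
-- def incompatible_attribute_value(columns_one_hot):
--     id_attribute_map = {e: c.split("=")[0] for e, c in enumerate(columns_one_hot)}
--     shared_attributes_incompatible = {}
--     for k, v in id_attribute_map.items():
--         if v not in shared_attributes_incompatible:
--             shared_attributes_incompatible[v] = []
--         shared_attributes_incompatible[v].append(k)
--     return {k: frozenset(v) for k, v in shared_attributes_incompatible.items()}
-- ===== SOURCE B (Python) =====
-- def incompatible_attribute_value(columns_one_hot):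
--     # Sort-free scan grouping: dedup the attribute prefixes in first-occurrence
--     # order, then collect each prefix's column indices with one comprehension.
--     prefixes = [c.split("=")[0] for c in columns_one_hot]
--     attributes = []
--     for p in prefixes:
--         if p not in attributes:
--             attributes.append(p)
--     return {
--         p: frozenset(i for i, q in enumerate(prefixes) if q == p)
--         for p in attributes
--     }
-- ===== Notes on version B (the rewrite author's own statement) =====
-- stated objective: alternative
-- what changed: Replaces A's two dict-building passes (int->prefix map, then hash grouping by dict append) with an ordered dedup of the prefixes followed by a per-attribute filtering comprehension over the enumerated prefixes.
import Mathlib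
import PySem

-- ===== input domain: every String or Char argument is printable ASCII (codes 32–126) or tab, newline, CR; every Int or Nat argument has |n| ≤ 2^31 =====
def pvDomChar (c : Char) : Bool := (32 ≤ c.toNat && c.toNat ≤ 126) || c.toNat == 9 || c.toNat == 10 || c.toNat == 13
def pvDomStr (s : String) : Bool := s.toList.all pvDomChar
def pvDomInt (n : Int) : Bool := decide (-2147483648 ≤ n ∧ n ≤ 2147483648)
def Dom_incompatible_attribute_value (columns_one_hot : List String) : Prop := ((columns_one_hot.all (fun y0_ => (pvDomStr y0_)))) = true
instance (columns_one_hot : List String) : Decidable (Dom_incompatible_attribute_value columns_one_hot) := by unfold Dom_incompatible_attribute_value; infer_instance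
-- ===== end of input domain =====

-- B replaces A's hash-grouping dict passes with an ordered dedup of prefixes plus a per-attribute filtering scan (alternative decomposition, same results).


-- ===== PORT A =====
-- c.split("=")[0]; split("=") never returns an empty list, so index 0 never raises (getD is exact here)
def pvPrefix (c : String) : String :=
  PySem.List.pyGetD ((PySem.Str.split? c "=").getD []) 0 ""

def incompatible_attribute_value (columns_one_hot : List String) : List (String × List Int) :=
  let id_attribute_map : PySem.Dict Int String :=
    (PySem.List.enumerate columns_one_hot).foldl
      (fun d p => d.insert p.1 (pvPrefix p.2)) PySem.Dict.empty
  let shared : PySem.Dict String (List Int) :=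
    id_attribute_map.items.foldl
      (fun d kv =>
        (if d.contains kv.2 then d else d.insert kv.2 []).modify kv.2 [] (fun l => l ++ [kv.1]))
      PySem.Dict.empty
  (shared.items.foldl (fun d kv => d.insert kv.1 (PySem.Set.ofList kv.2)) PySem.Dict.empty).items

-- ===== PORT B =====
def incompatible_attribute_value_alt (columns_one_hot : List String) : List (String × List Int) :=
  let prefixes := columns_one_hot.map pvPrefix
  let attributes : List String :=
    prefixes.foldl (fun acc p => if acc.contains p then acc else acc ++ [p]) []
  ((attributes.map (fun p => (p, PySem.Set.ofList
      (((PySem.List.enumerate prefixes).filter (fun q => q.2 == p)).map (fun q => q.1))))).foldl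
    (fun d kv => d.insert kv.1 kv.2) PySem.Dict.empty).items

-- ===== PRECONDITION & SPEC =====
def Spec_incompatible_attribute_value (columns_one_hot : List String) (out : List (String × List Int)) : Prop := out = incompatible_attribute_value_alt columns_one_hot
instance (columns_one_hot : List String) (out : List (String × List Int)) : Decidable (Spec_incompatible_attribute_value columns_one_hot out) := by unfold Spec_incompatible_attribute_value; infer_instance

-- ===== CLAIM (what is proved, stated in full; the proofs are below) =====
def Claim_equal_incompatible_attribute_value : Prop := ∀ (columns_one_hot : List String), Dom_incompatible_attribute_value columns_one_hot → Spec_incompatible_attribute_value columns_one_hot (incompatible_attribute_value columns_one_hot)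

-- ===== LEMMAS AND PROOFS =====

-- enumerate over a mapped list
theorem pv_enumerate_map {α β : Type} (f : α → β) (xs : List α) (s : Int) :
    PySem.List.enumerate (xs.map f) s = (PySem.List.enumerate xs s).map (fun p => (p.1, f p.2)) := by
  induction xs generalizing s with
  | nil => simp [PySem.List.enumerate_nil]
  | cons x xs ih => simp [PySem.List.enumerate_cons, ih]

-- A's "if v not in d: d[v] = []; d[v].append(k)" is just a modify with default []
theorem pv_step_eq (d : PySem.Dict String (List Int)) (v : String) (f : List Int → List Int) :
    (if d.contains v then d else d.insert v []).modify v [] f = d.modify v [] f := by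
  by_cases h : d.contains v = true
  · simp [h]
  · simp only [h, if_neg, Bool.false_eq_true, not_false_eq_true]
    simp [PySem.Dict.modify, PySem.Dict.insert_insert_self, PySem.Dict.getD_insert_self,
      PySem.Dict.getD_of_not_contains d (k := v) (d0 := ([] : List Int)) (by simpa using h)]

-- indices grouped by A's dict loop = indices collected by B's filter, for each prefix
theorem pv_nodup_fst_enumerate (cols : List String) :
    ((PySem.List.enumerate cols 0).map (fun p => p.1)).Nodup := by
  have h := PySem.List.pairwise_lt_enumerate (xs := cols) (s := 0)
  exact (List.pairwise_map.mpr (h.imp (fun hlt => ne_of_lt hlt)))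

-- the common normal form of both ports
-- A's whole grouping loop, characterised: keys in first-occurrence order, each with its indices
theorem pv_shared_items (M : List (Int × String)) :
    (M.foldl (fun d kv =>
        (if d.contains kv.2 then d else d.insert kv.2 []).modify kv.2 [] (fun t => t ++ [kv.1]))
      PySem.Dict.empty).items
    = (PySem.Set.ofList (M.map (fun kv => kv.2))).map
        (fun c => (c, (M.filter (fun kv => kv.2 == c)).map (fun kv => kv.1))) := by
  have hb : (fun (d : PySem.Dict String (List Int)) (kv : Int × String) =>
        (if d.contains kv.2 then d else d.insert kv.2 []).modify kv.2 [] (fun t => t ++ [kv.1]))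
      = fun d kv => d.modify kv.2 [] (fun t => t ++ [kv.1]) :=
    funext fun d => funext fun kv => pv_step_eq d kv.2 _
  rw [hb]
  have hmm := List.foldl_map (f := fun kv : Int × String => (kv.2, kv.1))
    (g := fun (d : PySem.Dict String (List Int)) (p : String × Int) =>
      d.modify p.1 [] (fun t => t ++ [p.2]))
    (l := M) (init := PySem.Dict.empty)
  beta_reduce at hmm
  rw [← hmm]
  have hnd : ((M.map (fun kv => (kv.2, kv.1))).foldl
      (fun d p => d.modify p.1 [] (fun t => t ++ [p.2])) PySem.Dict.empty).keys.Nodup :=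
    PySem.Dict.nodup_keys_foldl_modify_key (M.map (fun kv => (kv.2, kv.1))) (fun p => p.1) []
      (fun _ p => fun t => t ++ [p.2]) PySem.Dict.empty (by simp [PySem.Dict.keys_empty])
  rw [PySem.Dict.items_eq_map_keys _ hnd []]
  have hkeys := PySem.Dict.keys_foldl_modify_key (M.map (fun kv => (kv.2, kv.1))) (fun p => p.1) []
    (fun _ p => fun t => t ++ [p.2]) PySem.Dict.empty
  beta_reduce at hkeys
  rw [hkeys, PySem.Dict.keys_empty, PySem.Set.update_nil_left]
  have hgetD := fun c => PySem.Dict.getD_foldl_modify_append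
    (M.map (fun kv => (kv.2, kv.1))) PySem.Dict.empty c
  simp only [List.map_map] at *
  refine List.map_congr_left (fun c _ => ?_)
  rw [hgetD c, PySem.Dict.getD_empty, List.nil_append, List.filter_map, List.map_map]
  simp [Function.comp_def]

theorem pv_A_eq (cols : List String) :
    incompatible_attribute_value cols =
      (PySem.Set.ofList (cols.map pvPrefix)).map (fun p => (p, PySem.Set.ofList
        (((PySem.List.enumerate (cols.map pvPrefix)).filter (fun q => q.2 == p)).map (fun q => q.1)))) := by
  unfold incompatible_attribute_value
  have h1 : ((PySem.List.enumerate cols).foldl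
      (fun d p => d.insert p.1 (pvPrefix p.2)) PySem.Dict.empty).items
      = (PySem.List.enumerate cols).map (fun p => (p.1, pvPrefix p.2)) := by
    simpa using PySem.Dict.items_foldl_insert_fresh (PySem.List.enumerate cols)
      (fun p => p.1) (fun p => pvPrefix p.2) PySem.Dict.empty
      (fun a _ => PySem.Dict.contains_empty _) (pv_nodup_fst_enumerate cols)
  simp only [h1]
  rw [pv_shared_items]
  have h2 := PySem.Dict.items_foldl_insert_fresh
    ((PySem.Set.ofList (((PySem.List.enumerate cols).map (fun p => (p.1, pvPrefix p.2))).map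
        (fun kv => kv.2))).map
      (fun c => (c, (((PySem.List.enumerate cols).map (fun p => (p.1, pvPrefix p.2))).filter
        (fun kv => kv.2 == c)).map (fun kv => kv.1))))
    (fun kv => kv.1) (fun kv => PySem.Set.ofList kv.2) PySem.Dict.empty
    (fun a _ => PySem.Dict.contains_empty _)
    (by simpa [List.map_map, Function.comp_def] using
      PySem.Set.nodup_ofList (((PySem.List.enumerate cols).map (fun p => (p.1, pvPrefix p.2))).map (fun kv => kv.2)))
  rw [h2]
  have hsnd : (PySem.List.enumerate cols).map (fun x => pvPrefix x.2) = cols.map pvPrefix := by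
    rw [show (fun x : Int × String => pvPrefix x.2) = pvPrefix ∘ (fun x : Int × String => x.2) from rfl,
      ← List.map_map, PySem.List.map_snd_enumerate]
  have hni : (PySem.Dict.empty : PySem.Dict String (PySem.Set Int)).items = [] := rfl
  simp only [pv_enumerate_map, List.map_map, Function.comp_def, hsnd, hni, List.nil_append]

theorem pv_B_eq (cols : List String) :
    incompatible_attribute_value_alt cols =
      (PySem.Set.ofList (cols.map pvPrefix)).map (fun p => (p, PySem.Set.ofList
        (((PySem.List.enumerate (cols.map pvPrefix)).filter (fun q => q.2 == p)).map (fun q => q.1)))) := by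
  unfold incompatible_attribute_value_alt
  have hof : (cols.map pvPrefix).foldl
      (fun acc p => if acc.contains p then acc else acc ++ [p]) []
      = PySem.Set.ofList (cols.map pvPrefix) := rfl
  simp only [hof]
  have h2 := PySem.Dict.items_foldl_insert_fresh
    ((PySem.Set.ofList (cols.map pvPrefix)).map (fun p => (p, PySem.Set.ofList
      (((PySem.List.enumerate (cols.map pvPrefix)).filter (fun q => q.2 == p)).map (fun q => q.1)))))
    (fun kv => kv.1) (fun kv => kv.2) PySem.Dict.empty
    (fun a _ => PySem.Dict.contains_empty _)
    (by simpa [List.map_map, Function.comp_def] using PySem.Set.nodup_ofList (cols.map pvPrefix))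
  rw [h2]
  simp [List.map_map, Function.comp_def]
  rfl

-- ===== VERDICT (by name: the statement is the Claim_ definition above) =====
theorem incompatible_attribute_value_spec : Claim_equal_incompatible_attribute_value := by
  intro cols _
  unfold Spec_incompatible_attribute_value
  rw [pv_A_eq, pv_B_eq]
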